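-- pv_equiv track=rewrite | github.com/jesuswiki92/Design-Organization-Approval-APP-Production | rag-backend/chat/reference_extractor.py | get_missing_references
-- ===== SOURCE A (Python) =====
-- from typing import List, Set, Optional
--
-- def get_missing_references(referenced_sections: List[str],
--                             available_sections: List[str]) -> List[str]:
--     """
--     Find which referenced sections are not in the current context.
--
--     Args:
--         referenced_sections: Sections mentioned in text
--         available_sections: Sections already in context
--
--     Returns:
--         List of section IDs that need to be fetched
--     """
--     available_set = set(available_sections)
--     missing = []
--
--     for ref in referenced_sections:
--         # Check if this section or a parent is available
--         found = False
--         for avail in available_set: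
--             if ref.startswith(avail) or avail.startswith(ref) or ref == avail:
--                 found = True
--                 break
--
--         if not found:
--             missing.append(ref)
--
--     return missing
-- ===== SOURCE B (Python) =====
-- from typing import List
--
-- def get_missing_references(referenced_sections: List[str],
--                             available_sections: List[str]) -> List[str]:
--     """Same result as A, but with a precomputed prefix index: instead of
--     scanning every available section per reference, build once (a) the set of
--     available sections and (b) the set of all their prefixes; a reference is
--     covered iff it is a prefix of some available section (ref in prefix_set)
--     or some available section is a prefix of it (a proper prefix of ref in
--     available_set; ref itself is already handled by prefix_set)."""
--     available_set = set(available_sections)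
--     prefix_set = set()
--     for a in available_sections:
--         for k in range(len(a) + 1):
--             prefix_set.add(a[:k])
--     missing = []
--     for ref in referenced_sections:
--         if ref in prefix_set:
--             continue
--         if any(ref[:k] in available_set for k in range(len(ref))):
--             continue
--         missing.append(ref)
--     return missing
-- ===== Notes on version B (the rewrite author's own statement) =====
-- stated objective: faster
-- what changed: Instead of scanning every available section for each reference, B precomputes once a hash set of all prefixes of the available sections (plus the set of sections themselves) and answers each reference with O(L) set lookups, removing the inner scan.
import Mathlib
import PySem

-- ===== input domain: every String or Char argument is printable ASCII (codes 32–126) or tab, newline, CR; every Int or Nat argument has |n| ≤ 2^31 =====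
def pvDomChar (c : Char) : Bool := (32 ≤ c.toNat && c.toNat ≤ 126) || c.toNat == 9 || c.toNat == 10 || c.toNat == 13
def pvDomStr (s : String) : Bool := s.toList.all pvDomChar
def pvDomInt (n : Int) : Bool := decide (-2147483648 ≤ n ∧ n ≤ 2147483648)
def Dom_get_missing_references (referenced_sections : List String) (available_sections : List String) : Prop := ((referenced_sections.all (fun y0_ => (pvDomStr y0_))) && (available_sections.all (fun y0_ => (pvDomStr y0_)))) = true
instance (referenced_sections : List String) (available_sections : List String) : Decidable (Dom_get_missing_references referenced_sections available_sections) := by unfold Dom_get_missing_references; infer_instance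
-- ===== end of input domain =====

-- B replaces A's per-reference scan over all available sections by a prefix index
-- (set of all prefixes of available sections) built once, queried per reference.

-- ===== PORT A =====
def get_missing_references (referenced_sections : List String) (available_sections : List String) : List String :=
  let available_set : PySem.Set String := PySem.Set.ofList available_sections
  referenced_sections.foldl (fun missing ref =>
    -- inner 'for avail in available_set: … break' = first match over the set's elements
    let found := available_set.any (fun avail =>
      PySem.Str.startswith ref avail || PySem.Str.startswith avail ref || ref == avail)
    if !found then missing ++ [ref] else missing) []

-- ===== PORT B =====
def get_missing_references_alt (referenced_sections : List String) (available_sections : List String) : List String :=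
  let available_set : PySem.Set String := PySem.Set.ofList available_sections
  let prefix_set : PySem.Set String :=
    available_sections.foldl (fun ps a =>
      (PySem.List.pyRange 0 (PySem.Str.len a + 1)).foldl
        (fun ps k => PySem.Set.add ps (PySem.Str.slice a none (some k))) ps)
      PySem.Set.empty
  referenced_sections.foldl (fun missing ref =>
    if PySem.Set.contains prefix_set ref then missing
    else if (PySem.List.pyRange 0 (PySem.Str.len ref)).any
        (fun k => PySem.Set.contains available_set (PySem.Str.slice ref none (some k))) then missing
    else missing ++ [ref]) []

-- ===== PRECONDITION & SPEC =====
def Spec_get_missing_references (referenced_sections : List String) (available_sections : List String) (out : List String) : Prop := out = get_missing_references_alt referenced_sections available_sections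
instance (referenced_sections : List String) (available_sections : List String) (out : List String) : Decidable (Spec_get_missing_references referenced_sections available_sections out) := by unfold Spec_get_missing_references; infer_instance

-- ===== CLAIM (what is proved, stated in full; the proofs are below) =====
def Claim_equal_get_missing_references : Prop := ∀ (referenced_sections : List String) (available_sections : List String), Dom_get_missing_references referenced_sections available_sections → Spec_get_missing_references referenced_sections available_sections (get_missing_references referenced_sections available_sections)

-- ===== LEMMAS AND PROOFS =====

-- membership in a fold of Set.add
theorem mem_foldl_add {α β : Type} [BEq α] [LawfulBEq α] (f : β → α) (L : List β)
    (ps : PySem.Set α) (x : α) :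
    x ∈ L.foldl (fun ps k => PySem.Set.add ps (f k)) ps ↔ x ∈ ps ∨ ∃ k ∈ L, x = f k := by
  induction L generalizing ps with
  | nil => simp
  | cons h t ih =>
    simp only [List.foldl_cons, ih, PySem.Set.mem_add, List.mem_cons]
    constructor
    · rintro ((hx | hx) | ⟨k, hk, rfl⟩)
      · exact Or.inl hx
      · exact Or.inr ⟨h, Or.inl rfl, hx⟩
      · exact Or.inr ⟨k, Or.inr hk, rfl⟩
    · rintro (hx | ⟨k, (rfl | hk), rfl⟩)
      · exact Or.inl (Or.inl hx)
      · exact Or.inl (Or.inr rfl)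
      · exact Or.inr ⟨k, hk, rfl⟩

-- ref = a[:k] for some 0 ≤ k < len a + 1  ↔  ref is a prefix of a
theorem exists_slice_iff_prefix (a x : String) :
    (∃ k ∈ PySem.List.pyRange 0 (PySem.Str.len a + 1), x = PySem.Str.slice a none (some k)) ↔
      x.toList <+: a.toList := by
  constructor
  · rintro ⟨k, hk, rfl⟩
    rw [PySem.List.mem_pyRange_one] at hk
    rw [PySem.Str.toList_slice, PySem.Chars.slice_eq_listSlice,
        PySem.List.slice_to a.toList hk.1]
    exact List.take_prefix _ _
  · intro hpre
    refine ⟨(x.toList.length : Int), ?_, ?_⟩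
    · rw [PySem.List.mem_pyRange_one, PySem.Str.len_eq]
      have := hpre.length_le
      omega
    · rw [String.ext_iff, PySem.Str.toList_slice, PySem.Chars.slice_eq_listSlice,
          PySem.List.slice_to_natCast]
      exact List.prefix_iff_eq_take.mp hpre

-- membership in the prefix index: exactly the strings that are a prefix of some available section
theorem mem_prefix_fold (avails : List String) (ps : PySem.Set String) (x : String) :
    x ∈ avails.foldl (fun ps a =>
        (PySem.List.pyRange 0 (PySem.Str.len a + 1)).foldl
          (fun ps k => PySem.Set.add ps (PySem.Str.slice a none (some k))) ps) ps
      ↔ x ∈ ps ∨ ∃ a ∈ avails, x.toList <+: a.toList := by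
  induction avails generalizing ps with
  | nil => simp
  | cons h t ih =>
    simp only [List.foldl_cons, ih, mem_foldl_add, List.mem_cons]
    rw [exists_slice_iff_prefix h x]
    constructor
    · rintro ((hx | hx) | ⟨a, ha, hp⟩)
      · exact Or.inl hx
      · exact Or.inr ⟨h, Or.inl rfl, hx⟩
      · exact Or.inr ⟨a, Or.inr ha, hp⟩
    · rintro (hx | ⟨a, (rfl | ha), hp⟩)
      · exact Or.inl (Or.inl hx)
      · exact Or.inl (Or.inr hp)
      · exact Or.inr ⟨a, ha, hp⟩

-- the per-reference condition of A equals the per-reference condition of B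
theorem found_eq (avails : List String) (ref : String) :
    ((PySem.Set.ofList avails).any (fun avail =>
        PySem.Str.startswith ref avail || PySem.Str.startswith avail ref || ref == avail))
    = (PySem.Set.contains
          (avails.foldl (fun ps a =>
            (PySem.List.pyRange 0 (PySem.Str.len a + 1)).foldl
              (fun ps k => PySem.Set.add ps (PySem.Str.slice a none (some k))) ps)
            PySem.Set.empty) ref
       || (PySem.List.pyRange 0 (PySem.Str.len ref)).any
            (fun k => PySem.Set.contains (PySem.Set.ofList avails) (PySem.Str.slice ref none (some k)))) := by
  rw [Bool.eq_iff_iff]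
  simp only [List.any_eq_true, Bool.or_eq_true, PySem.Set.contains_iff, PySem.Set.mem_ofList,
    mem_prefix_fold, PySem.Str.startswith_eq, PySem.Chars.startswith_iff, beq_iff_eq,
    PySem.List.mem_pyRange_one, PySem.Set.empty, List.not_mem_nil, false_or]
  constructor
  · rintro ⟨a, ha, hcase⟩
    rcases hcase with (h | h) | h
    · rcases Nat.lt_or_ge a.toList.length ref.toList.length with hlt | hge
      · refine Or.inr ⟨(a.toList.length : Int), ⟨by omega, ?_⟩, ?_⟩
        · rw [PySem.Str.len_eq]; exact_mod_cast hlt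
        · have hx : PySem.Str.slice ref none (some (a.toList.length : Int)) = a := by
            rw [String.ext_iff, PySem.Str.toList_slice, PySem.Chars.slice_eq_listSlice,
              PySem.List.slice_to_natCast]
            exact (List.prefix_iff_eq_take.mp h).symm
          rw [hx]; exact ha
      · have : a.toList = ref.toList := h.eq_of_length_le hge
        exact Or.inl ⟨a, ha, by rw [this]⟩
    · exact Or.inl ⟨a, ha, h⟩
    · subst h; exact Or.inl ⟨ref, ha, List.prefix_refl _⟩
  · rintro (⟨a, ha, h⟩ | ⟨k, ⟨hk0, _⟩, hmem⟩)
    · exact ⟨a, ha, Or.inl (Or.inr h)⟩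
    · refine ⟨_, hmem, Or.inl (Or.inl ?_)⟩
      rw [PySem.Str.toList_slice, PySem.Chars.slice_eq_listSlice, PySem.List.slice_to ref.toList hk0]
      exact List.take_prefix _ _

-- the two loops over referenced_sections build the same list
theorem loops_eq (avails : List String) (refs : List String) (acc : List String) :
    refs.foldl (fun missing ref =>
      let found := (PySem.Set.ofList avails).any (fun avail =>
        PySem.Str.startswith ref avail || PySem.Str.startswith avail ref || ref == avail)
      if !found then missing ++ [ref] else missing) acc
    = refs.foldl (fun missing ref =>
      if PySem.Set.contains
          (avails.foldl (fun ps a =>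
            (PySem.List.pyRange 0 (PySem.Str.len a + 1)).foldl
              (fun ps k => PySem.Set.add ps (PySem.Str.slice a none (some k))) ps)
            PySem.Set.empty) ref then missing
      else if (PySem.List.pyRange 0 (PySem.Str.len ref)).any
          (fun k => PySem.Set.contains (PySem.Set.ofList avails) (PySem.Str.slice ref none (some k))) then missing
      else missing ++ [ref]) acc := by
  induction refs generalizing acc with
  | nil => rfl
  | cons r t ih =>
    simp only [List.foldl_cons]
    rw [show (let found := (PySem.Set.ofList avails).any (fun avail =>
        PySem.Str.startswith r avail || PySem.Str.startswith avail r || r == avail)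
      if !found then acc ++ [r] else acc)
      = (if PySem.Set.contains
          (avails.foldl (fun ps a =>
            (PySem.List.pyRange 0 (PySem.Str.len a + 1)).foldl
              (fun ps k => PySem.Set.add ps (PySem.Str.slice a none (some k))) ps)
            PySem.Set.empty) r then acc
        else if (PySem.List.pyRange 0 (PySem.Str.len r)).any
            (fun k => PySem.Set.contains (PySem.Set.ofList avails) (PySem.Str.slice r none (some k))) then acc
        else acc ++ [r]) from by
      simp only [found_eq avails r]
      rcases hc1 : PySem.Set.contains
          (avails.foldl (fun ps a =>
            (PySem.List.pyRange 0 (PySem.Str.len a + 1)).foldl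
              (fun ps k => PySem.Set.add ps (PySem.Str.slice a none (some k))) ps)
            PySem.Set.empty) r with _ | _ <;>
        rcases hc2 : (PySem.List.pyRange 0 (PySem.Str.len r)).any
            (fun k => PySem.Set.contains (PySem.Set.ofList avails) (PySem.Str.slice r none (some k))) with _ | _ <;>
        simp]
    exact ih _

-- ===== VERDICT (by name: the statement is the Claim_ definition above) =====
theorem get_missing_references_spec : Claim_equal_get_missing_references := by
  intro refs avails _
  unfold Spec_get_missing_references get_missing_references get_missing_references_alt
  exact loops_eq avails refs []
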